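-- pv_equiv track=rewrite | github.com/wlab-45/odepcellarray | simulation/virtual_complete_process.py | structure_and_center_of_array
-- ===== SOURCE A (Python) =====
-- import math, random
--
-- def structure_and_center_of_array (target_numbers, size):
--     num_layers = int(math.sqrt(target_numbers))
--     array_layers = [[] for _ in range(num_layers)]
--     for i in range(num_layers):  #假設每層3格(3*3矩陣)則標號為layer(row) 0,1,2 每層格編號(左至右)
--         for j in range(1, num_layers*2, 2):
--             k=i+1
--             array_layers[i].append((size *j// 2, size *(2*k-1)//2))
--     return array_layers
-- ===== SOURCE B (Python) =====
-- import math
--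
-- def structure_and_center_of_array(target_numbers, size):
--     num_layers = int(math.sqrt(target_numbers))
--     half = size // 2
--     row = [(half + c * size, half) for c in range(num_layers)]
--     grid = []
--     for _ in range(num_layers):
--         grid.append(row)
--         row = [(x, y + size) for (x, y) in row]
--     return grid
-- ===== Notes on version B (the rewrite author's own statement) =====
-- stated objective: faster
-- what changed: B replaces the per-cell floor-division arithmetic with the closed form half + index*size (half = size//2) and builds the grid incrementally: it constructs row 0 once and derives each later row by shifting the previous row's y-coordinates by size, instead of recomputing both coordinates with multiplications and divisions in every cell of nested loops.
import Mathlib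
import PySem

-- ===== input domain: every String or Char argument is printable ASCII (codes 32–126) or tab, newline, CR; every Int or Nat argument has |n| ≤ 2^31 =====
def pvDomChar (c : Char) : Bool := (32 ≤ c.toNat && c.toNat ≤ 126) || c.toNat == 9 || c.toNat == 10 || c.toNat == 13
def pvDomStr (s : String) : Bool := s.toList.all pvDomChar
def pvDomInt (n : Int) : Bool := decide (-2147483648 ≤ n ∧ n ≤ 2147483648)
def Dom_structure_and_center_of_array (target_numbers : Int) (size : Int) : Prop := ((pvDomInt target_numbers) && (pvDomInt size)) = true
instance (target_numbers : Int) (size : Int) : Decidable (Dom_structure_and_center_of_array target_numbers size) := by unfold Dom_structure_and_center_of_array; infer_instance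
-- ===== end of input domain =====

-- B builds row 0 from the closed form half + c*size and derives each later row by
-- shifting the previous row's y by size; A recomputes both coordinates per cell.

-- ===== PORT A =====
-- num_layers = int(math.sqrt(target_numbers)); exact on Dom (|n| ≤ 2^31 < 2^52, where
-- int(math.sqrt(n)) = isqrt(n)); raises ValueError for negative input (excluded by Pre_).
def structure_and_center_of_array (target_numbers : Int) (size : Int) : List (List (Int × Int)) :=
  let numLayers : Int := (Nat.sqrt target_numbers.toNat : Int)
  -- array_layers starts as num_layers empty lists; row i is filled by appending in j-order
  (PySem.List.pyRange 0 numLayers 1).map (fun i =>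
    (PySem.List.pyRange 1 (numLayers * 2) 2).foldl (fun row j =>
      let k := i + 1
      row ++ [(PySem.Int.floordiv (size * j) 2, PySem.Int.floordiv (size * (2 * k - 1)) 2)]) [])

-- ===== PORT B =====
def structure_and_center_of_array_alt (target_numbers : Int) (size : Int) : List (List (Int × Int)) :=
  let numLayers : Int := (Nat.sqrt target_numbers.toNat : Int)
  let half := PySem.Int.floordiv size 2
  let row0 := (PySem.List.pyRange 0 numLayers 1).map (fun c => (half + c * size, half))
  ((PySem.List.pyRange 0 numLayers 1).foldl
    (fun (st : List (List (Int × Int)) × List (Int × Int)) _ =>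
      (st.1 ++ [st.2], st.2.map (fun p => (p.1, p.2 + size)))) ([], row0)).1

-- ===== PRECONDITION & SPEC =====
-- math.sqrt raises ValueError on negative target_numbers (both A and B raise there)
def Pre_structure_and_center_of_array (target_numbers : Int) (size : Int) : Prop := 0 ≤ target_numbers
instance (target_numbers : Int) (size : Int) : Decidable (Pre_structure_and_center_of_array target_numbers size) := by unfold Pre_structure_and_center_of_array; infer_instance
def pvWitness_structure_and_center_of_array : Int × Int := (10, 5)

def Spec_structure_and_center_of_array (target_numbers : Int) (size : Int) (out : List (List (Int × Int))) : Prop := out = structure_and_center_of_array_alt target_numbers size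
instance (target_numbers : Int) (size : Int) (out : List (List (Int × Int))) : Decidable (Spec_structure_and_center_of_array target_numbers size out) := by unfold Spec_structure_and_center_of_array; infer_instance

-- ===== CLAIM (what is proved, stated in full; the proofs are below) =====
def Claim_equal_structure_and_center_of_array : Prop := ∀ (target_numbers : Int) (size : Int), Dom_structure_and_center_of_array target_numbers size → Pre_structure_and_center_of_array target_numbers size → Spec_structure_and_center_of_array target_numbers size (structure_and_center_of_array target_numbers size)

-- ===== LEMMAS AND PROOFS =====

-- range(1, 2n, 2) enumerates the odd numbers 2c+1 for c in range(n)
theorem pyRange_odd (n : Int) :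
    PySem.List.pyRange 1 (n * 2) 2 = (List.range n.toNat).map (fun (c : Nat) => (1 : Int) + 2 * c) := by
  rw [PySem.List.pyRange_of_pos _ _ (by norm_num : (0:Int) < 2)]
  have hlen : (if (1:Int) < n * 2 then ((n * 2 - 1 + 2 - 1) / 2).toNat else 0) = n.toNat := by
    split_ifs with h <;> omega
  rw [hlen]

-- A's inner loop builds the row of x-coordinates paired with the fixed row y
theorem row_eq (y : Int) (size : Int) (n : Int) :
    (PySem.List.pyRange 1 (n * 2) 2).foldl (fun row j =>
        row ++ [(PySem.Int.floordiv (size * j) 2, y)]) []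
      = (List.range n.toNat).map (fun (c : Nat) =>
          (PySem.Int.floordiv (size * (2 * c + 1)) 2, y)) := by
  rw [pyRange_odd, PySem.List.foldl_append_eq_flatMap, List.nil_append]
  generalize List.range n.toNat = l
  induction l with
  | nil => simp
  | cons a l ih =>
      simp only [List.map_cons, List.flatMap_cons, ih, List.cons_append, List.nil_append]
      congr 3
      ring

-- closed form for the centre coordinate: size*(2k+1) // 2 = size//2 + k*size
theorem floordiv_center (size k : Int) :
    PySem.Int.floordiv (size * (2 * k + 1)) 2 = PySem.Int.floordiv size 2 + k * size := by
  simp only [PySem.Int.floordiv_eq_ediv_of_pos (by norm_num : (0:Int) < 2)]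
  have h : size * (2 * k + 1) = size + (k * size) * 2 := by ring
  rw [h, Int.add_mul_ediv_right _ _ (by norm_num : (2:Int) ≠ 0)]

-- B's loop: after |l| steps the accumulated grid is g followed by the successive shifts of r
theorem foldl_build (size : Int) (l : List Int)
    (g : List (List (Int × Int))) (r : List (Int × Int)) :
    (l.foldl (fun (st : List (List (Int × Int)) × List (Int × Int)) _ =>
        (st.1 ++ [st.2], st.2.map (fun p => (p.1, p.2 + size)))) (g, r)).1
      = g ++ (List.range l.length).map (fun (i : Nat) =>
          r.map (fun p => (p.1, p.2 + (i : Int) * size))) := by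
  induction l generalizing g r with
  | nil => simp
  | cons a l ih =>
      simp only [List.foldl_cons, ih, List.length_cons, List.range_succ_eq_map,
        List.map_cons, List.map_map]
      rw [List.append_assoc]
      congr 1
      simp only [List.cons_append, List.nil_append]
      congr 1
      · simp
      · apply List.map_congr_left
        intro i _
        simp only [Function.comp_apply, List.map_map]
        apply List.map_congr_left
        intro p _
        simp only [Function.comp_apply, Prod.mk.injEq]
        refine ⟨trivial, ?_⟩
        push_cast
        ring

-- ===== VERDICT (by name: the statement is the Claim_ definition above) =====
theorem structure_and_center_of_array_spec : Claim_equal_structure_and_center_of_array := by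
  intro t size _ _
  unfold Spec_structure_and_center_of_array structure_and_center_of_array structure_and_center_of_array_alt
  simp only []
  set n : Int := (Nat.sqrt t.toNat : Int) with hn
  rw [foldl_build, List.nil_append, PySem.List.length_pyRange_one]
  have hnn : (n - 0).toNat = n.toNat := by omega
  rw [hnn, PySem.List.pyRange_one, List.map_map, List.map_map]
  apply List.map_congr_left
  intro i _hi
  simp only [Function.comp_apply, sub_zero, zero_add, List.map_map]
  rw [row_eq (PySem.Int.floordiv (size * (2 * ((i:Int) + 1) - 1)) 2) size n]
  apply List.map_congr_left
  intro c _hc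
  simp only [Function.comp_apply]
  have h1 := floordiv_center size (c : Int)
  have h2 := floordiv_center size (i : Int)
  rw [Prod.mk.injEq]
  exact ⟨h1, by rw [show size * (2 * ((i:Int) + 1) - 1) = size * (2 * (i:Int) + 1) by ring, h2]⟩
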